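-- pv_equiv track=rewrite | github.com/dulrajnr/prompt-efficiency-suite | src/prompt_efficiency_suite/model_translator.py | _parse_prompt
-- ===== SOURCE A (Python) =====
-- from typing import Any, Dict, List, Optional, TypedDict, Union
--
-- class FormatTemplate(TypedDict):
--     """Type definition for format templates."""
--
--     system: str
--     user: str
--     assistant: str
--     format: Dict[str, str]
--
-- def _parse_prompt(
--     prompt: str, template: FormatTemplate
-- ) -> Dict[str, List[str]]:
--     """Parse prompt into components.
--
--     Args:
--         prompt (str): Prompt to parse.
--         template (FormatTemplate): Format template.
--
--     Returns:
--         Dict[str, List[str]]: Parsed prompt components.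
--     """
--     components: Dict[str, List[str]] = {"system": [], "user": [], "assistant": []}
--
--     # Split prompt into lines
--     lines = prompt.split("\n")
--     current_role: Optional[str] = None
--     current_content: List[str] = []
--
--     for line in lines:
--         # Check for role markers
--         if line.startswith("System:"):
--             if current_role:
--                 components[current_role].append("\n".join(current_content))
--             current_role = "system"
--             current_content = [line[7:].strip()]
--         elif line.startswith("User:"):
--             if current_role:
--                 components[current_role].append("\n".join(current_content))
--             current_role = "user"
--             current_content = [line[5:].strip()]
--         elif line.startswith("Assistant:"):
--             if current_role:
--                 components[current_role].append("\n".join(current_content))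
--             current_role = "assistant"
--             current_content = [line[10:].strip()]
--         else:
--             if current_role:
--                 current_content.append(line)
--
--     # Add last component
--     if current_role and current_content:
--         components[current_role].append("\n".join(current_content))
--
--     return components
-- ===== SOURCE B (Python) =====
-- def _parse_prompt(prompt, template):
--     """Parse prompt into role components by a single backward traversal:
--     iterate the lines in reverse with a pending-tail buffer; a marker line
--     emits its whole block at once, and per-role lists are reversed at the end."""
--     markers = (("System:", "system"), ("User:", "user"), ("Assistant:", "assistant"))
--     rev = {"system": [], "user": [], "assistant": []}
--     tail = []  # lines already seen below the current one (nearest first), up to the next marker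
--     for line in reversed(prompt.split("\n")):
--         for m, r in markers:
--             if line.startswith(m):
--                 rev[r].append("\n".join([line[len(m):].strip()] + tail[::-1]))
--                 tail = []
--                 break
--         else:
--             tail.append(line)
--     # whatever remains in tail precedes the first marker and is dropped
--     return {role: blocks[::-1] for role, blocks in rev.items()}
-- ===== Notes on version B (the rewrite author's own statement) =====
-- stated objective: alternative
-- what changed: Replaces A's forward flush-state machine (current_role/current_content mutated and flushed on each marker) with a backward traversal: lines are scanned in reverse with a pending-tail buffer, each marker line emits its complete block immediately, pre-marker lines are what is left in the buffer and are dropped, and the per-role lists are reversed at the end.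
import Mathlib
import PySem

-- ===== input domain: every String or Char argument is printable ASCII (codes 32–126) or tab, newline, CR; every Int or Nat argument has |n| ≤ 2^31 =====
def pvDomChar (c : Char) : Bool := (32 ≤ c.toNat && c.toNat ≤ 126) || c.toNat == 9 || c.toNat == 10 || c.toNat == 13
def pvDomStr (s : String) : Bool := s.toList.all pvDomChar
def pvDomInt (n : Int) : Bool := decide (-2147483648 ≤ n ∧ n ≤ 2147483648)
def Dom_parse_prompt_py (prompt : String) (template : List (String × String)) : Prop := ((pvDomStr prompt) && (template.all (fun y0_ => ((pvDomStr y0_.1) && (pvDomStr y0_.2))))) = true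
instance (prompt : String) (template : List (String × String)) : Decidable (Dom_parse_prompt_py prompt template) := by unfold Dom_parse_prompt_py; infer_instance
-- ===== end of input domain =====

-- B replaces A's forward flush-state machine by a backward traversal: lines are scanned in
-- reverse with a pending-tail buffer, each marker line emits its whole block at once, and the
-- per-role lists are reversed at the end; alternative decomposition, same cost.


-- ===== PORT A =====
-- the initial components dict {"system": [], "user": [], "assistant": []} (same literal in both Pythons)
def pvInitComponents : PySem.Dict String (List String) :=
  (((PySem.Dict.empty).insert "system" []).insert "user" []).insert "assistant" []

-- components[role].append(x); the role keys are always present, so Dict.modify is exact here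
def pvEmit (d : PySem.Dict String (List String)) (role : String) (x : String) :
    PySem.Dict String (List String) :=
  d.modify role [] (fun l => l ++ [x])

-- the body of A's for-loop, on state (components, current_role, current_content)
def parseA_step
    (st : PySem.Dict String (List String) × Option String × List String) (line : String) :
    PySem.Dict String (List String) × Option String × List String :=
  let (components, current_role, current_content) := st
  if PySem.Str.startswith line "System:" then
    let components := match current_role with
      | some r => pvEmit components r (PySem.Str.join "\n" current_content)
      | none => components
    (components, some "system", [PySem.Str.strip (PySem.Str.slice line (some 7) none)])
  else if PySem.Str.startswith line "User:" then
    let components := match current_role with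
      | some r => pvEmit components r (PySem.Str.join "\n" current_content)
      | none => components
    (components, some "user", [PySem.Str.strip (PySem.Str.slice line (some 5) none)])
  else if PySem.Str.startswith line "Assistant:" then
    let components := match current_role with
      | some r => pvEmit components r (PySem.Str.join "\n" current_content)
      | none => components
    (components, some "assistant", [PySem.Str.strip (PySem.Str.slice line (some 10) none)])
  else
    match current_role with
    | some _ => (components, current_role, current_content ++ [line])
    | none => st

def parse_prompt_py (prompt : String) (template : List (String × String)) :
    List (String × List String) :=
  -- prompt.split("\n"): sep "\n" is nonempty, so split? is always `some`
  let lines := (PySem.Str.split? prompt "\n").getD []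
  let st := lines.foldl parseA_step (pvInitComponents, none, [])
  -- if current_role and current_content: components[current_role].append("\n".join(current_content))
  match st with
  | (components, some r, content) =>
      if content ≠ [] then (pvEmit components r (PySem.Str.join "\n" content)).items
      else components.items
  | (components, none, _) => components.items

-- ===== PORT B =====
def pvMarkers : List (String × String) :=
  [("System:", "system"), ("User:", "user"), ("Assistant:", "assistant")]

-- B's inner 'for m, r in markers: if line.startswith(m): … break' scan, returning
-- (role, line[len(m):].strip()) for the first matching marker
def pvMatchMarker : List (String × String) → String → Option (String × String)
  | [], _ => none
  | (m, r) :: rest, line =>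
    if PySem.Str.startswith line m then
      some (r, PySem.Str.strip (PySem.Str.slice line (some (PySem.Str.len m)) none))
    else pvMatchMarker rest line

-- body of B's loop over reversed(lines); state (rev, tail)
def parseB_step (st : PySem.Dict String (List String) × List String) (line : String) :
    PySem.Dict String (List String) × List String :=
  let (rev, tail) := st
  match pvMatchMarker pvMarkers line with
  | some (r, h) =>
      -- rev[r].append("\n".join([head] + tail[::-1])); tail = []
      (rev.modify r [] (fun l =>
        l ++ [PySem.Str.join "\n" (h :: ((PySem.List.slice? tail none none (-1)).getD []))]), [])
  | none => (rev, tail ++ [line])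

def parse_prompt_py_alt (prompt : String) (template : List (String × String)) :
    List (String × List String) :=
  let lines := (PySem.Str.split? prompt "\n").getD []
  -- for line in reversed(lines): …
  let st := lines.reverse.foldl parseB_step (pvInitComponents, [])
  -- {role: blocks[::-1] for role, blocks in rev.items()}
  (st.1.items.foldl
    (fun d p => d.insert p.1 ((PySem.List.slice? p.2 none none (-1)).getD []))
    PySem.Dict.empty).items

-- ===== PRECONDITION & SPEC =====
def Spec_parse_prompt_py (prompt : String) (template : List (String × String)) (out : List (String × List String)) : Prop := out = parse_prompt_py_alt prompt template
instance (prompt : String) (template : List (String × String)) (out : List (String × List String)) : Decidable (Spec_parse_prompt_py prompt template out) := by unfold Spec_parse_prompt_py; infer_instance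

-- ===== CLAIM (what is proved, stated in full; the proofs are below) =====
def Claim_equal_parse_prompt_py : Prop := ∀ (prompt : String) (template : List (String × String)), Dom_parse_prompt_py prompt template → Spec_parse_prompt_py prompt template (parse_prompt_py prompt template)

-- ===== LEMMAS AND PROOFS =====

-- common specification: the prompt's lines segmented into role-labelled blocks
def pvNoMark (l : String) : Bool := (pvMatchMarker pvMarkers l).isNone

def pvPre (ls : List String) : List String := ls.takeWhile pvNoMark

def pvSegs : List String → List (String × List String)
  | [] => []
  | l :: ls =>
    match pvMatchMarker pvMarkers l with
    | some (r, h) => (r, h :: pvPre ls) :: pvSegs ls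
    | none => pvSegs ls

def pvSel (role : String) (bs : List (String × List String)) : List String :=
  (bs.filter (fun b => b.1 == role)).map (fun b => PySem.Str.join "\n" b.2)

def pvMkD (x y z : List String) : PySem.Dict String (List String) :=
  (((PySem.Dict.empty).insert "system" x).insert "user" y).insert "assistant" z

def pvEmitJoin (d : PySem.Dict String (List String)) (b : String × List String) :
    PySem.Dict String (List String) :=
  pvEmit d b.1 (PySem.Str.join "\n" b.2)

theorem pvEmit_mkD_sys (x y z : List String) (v : String) :
    pvEmit (pvMkD x y z) "system" v = pvMkD (x ++ [v]) y z := rfl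

theorem pvEmit_mkD_user (x y z : List String) (v : String) :
    pvEmit (pvMkD x y z) "user" v = pvMkD x (y ++ [v]) z := rfl

theorem pvEmit_mkD_asst (x y z : List String) (v : String) :
    pvEmit (pvMkD x y z) "assistant" v = pvMkD x y (z ++ [v]) := rfl

theorem pvMatchMarker_roles {l r h : String}
    (hm : pvMatchMarker pvMarkers l = some (r, h)) :
    r = "system" ∨ r = "user" ∨ r = "assistant" := by
  simp only [pvMatchMarker, pvMarkers] at hm
  split_ifs at hm <;> simp_all

theorem pvSegs_roles (ls : List String) :
    ∀ b ∈ pvSegs ls, b.1 = "system" ∨ b.1 = "user" ∨ b.1 = "assistant" := by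
  induction ls with
  | nil => simp [pvSegs]
  | cons l ls ih =>
    intro b hb
    cases hm : pvMatchMarker pvMarkers l with
    | none =>
      simp only [pvSegs, hm] at hb
      exact ih b hb
    | some p =>
      obtain ⟨r, h⟩ := p
      simp only [pvSegs, hm] at hb
      rcases List.mem_cons.mp hb with hb | hb
      · subst hb; exact pvMatchMarker_roles hm
      · exact ih b hb

theorem pvFoldl_emitJoin (bs : List (String × List String)) :
    ∀ x y z, (∀ b ∈ bs, b.1 = "system" ∨ b.1 = "user" ∨ b.1 = "assistant") →
    bs.foldl pvEmitJoin (pvMkD x y z) =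
      pvMkD (x ++ pvSel "system" bs) (y ++ pvSel "user" bs) (z ++ pvSel "assistant" bs) := by
  induction bs with
  | nil => simp [pvSel]
  | cons b bs ih =>
    intro x y z hroles
    obtain ⟨r, c⟩ := b
    have hr := hroles (r, c) (by simp)
    simp only [List.foldl_cons]
    rcases hr with hr | hr | hr <;> subst hr
    · rw [show pvEmitJoin (pvMkD x y z) ("system", c) =
          pvMkD (x ++ [PySem.Str.join "\n" c]) y z from rfl,
        ih _ _ _ (fun b hb => hroles b (by simp [hb]))]
      simp [pvSel]
    · rw [show pvEmitJoin (pvMkD x y z) ("user", c) =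
          pvMkD x (y ++ [PySem.Str.join "\n" c]) z from rfl,
        ih _ _ _ (fun b hb => hroles b (by simp [hb]))]
      simp [pvSel]
    · rw [show pvEmitJoin (pvMkD x y z) ("assistant", c) =
          pvMkD x y (z ++ [PySem.Str.join "\n" c]) from rfl,
        ih _ _ _ (fun b hb => hroles b (by simp [hb]))]
      simp [pvSel]

-- A's final flush, as a function of A's loop state
def pvFinalA (st : PySem.Dict String (List String) × Option String × List String) :
    List (String × List String) :=
  match st with
  | (components, some r, content) =>
      if content ≠ [] then (pvEmit components r (PySem.Str.join "\n" content)).items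
      else components.items
  | (components, none, _) => components.items

-- the three startswith tests of A, phrased as pvMatchMarker results
theorem pvMatch_sys {line : String}
    (h1 : PySem.Chars.startswith line.toList ['S','y','s','t','e','m',':'] = true) :
    pvMatchMarker pvMarkers line =
      some ("system", PySem.Str.strip (PySem.Str.slice line (some 7) none)) := by
  simp [pvMatchMarker, pvMarkers, PySem.Str.startswith, PySem.Str.len, h1]

theorem pvMatch_user {line : String}
    (h1 : ¬ PySem.Chars.startswith line.toList ['S','y','s','t','e','m',':'] = true)
    (h2 : PySem.Chars.startswith line.toList ['U','s','e','r',':'] = true) :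
    pvMatchMarker pvMarkers line =
      some ("user", PySem.Str.strip (PySem.Str.slice line (some 5) none)) := by
  simp [pvMatchMarker, pvMarkers, PySem.Str.startswith, PySem.Str.len, h1, h2]

theorem pvMatch_asst {line : String}
    (h1 : ¬ PySem.Chars.startswith line.toList ['S','y','s','t','e','m',':'] = true)
    (h2 : ¬ PySem.Chars.startswith line.toList ['U','s','e','r',':'] = true)
    (h3 : PySem.Chars.startswith line.toList ['A','s','s','i','s','t','a','n','t',':'] = true) :
    pvMatchMarker pvMarkers line =
      some ("assistant", PySem.Str.strip (PySem.Str.slice line (some 10) none)) := by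
  simp [pvMatchMarker, pvMarkers, PySem.Str.startswith, PySem.Str.len, h1, h2, h3]

theorem pvMatch_none {line : String}
    (h1 : ¬ PySem.Chars.startswith line.toList ['S','y','s','t','e','m',':'] = true)
    (h2 : ¬ PySem.Chars.startswith line.toList ['U','s','e','r',':'] = true)
    (h3 : ¬ PySem.Chars.startswith line.toList ['A','s','s','i','s','t','a','n','t',':'] = true) :
    pvMatchMarker pvMarkers line = none := by
  simp [pvMatchMarker, pvMarkers, PySem.Str.startswith, h1, h2, h3]

-- A's loop from an open block (r, c): the result renders (r, c ++ pre) then the remaining segments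
theorem pvA_some (ls : List String) :
    ∀ (d : PySem.Dict String (List String)) (r : String) (c : List String), c ≠ [] →
    pvFinalA (ls.foldl parseA_step (d, some r, c)) =
      (((r, c ++ pvPre ls) :: pvSegs ls).foldl pvEmitJoin d).items := by
  induction ls with
  | nil =>
    intro d r c hc
    simp [pvFinalA, hc, pvSegs, pvPre, pvEmitJoin, pvEmit]
  | cons line ls ih =>
    intro d r c hc
    simp only [List.foldl_cons]
    by_cases h1 : PySem.Chars.startswith line.toList ['S','y','s','t','e','m',':'] = true
    · have hm := pvMatch_sys h1
      have hA : parseA_step (d, some r, c) line =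
          (pvEmitJoin d (r, c), some "system",
            [PySem.Str.strip (PySem.Str.slice line (some 7) none)]) := by
        simp [parseA_step, h1, pvEmitJoin]
      rw [hA, ih _ "system" _ (by simp)]
      simp [pvSegs, pvPre, pvNoMark, hm]
    · by_cases h2 : PySem.Chars.startswith line.toList ['U','s','e','r',':'] = true
      · have hm := pvMatch_user h1 h2
        have hA : parseA_step (d, some r, c) line =
            (pvEmitJoin d (r, c), some "user",
              [PySem.Str.strip (PySem.Str.slice line (some 5) none)]) := by
          simp [parseA_step, h1, h2, pvEmitJoin]
        rw [hA, ih _ "user" _ (by simp)]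
        simp [pvSegs, pvPre, pvNoMark, hm]
      · by_cases h3 : PySem.Chars.startswith line.toList ['A','s','s','i','s','t','a','n','t',':'] = true
        · have hm := pvMatch_asst h1 h2 h3
          have hA : parseA_step (d, some r, c) line =
              (pvEmitJoin d (r, c), some "assistant",
                [PySem.Str.strip (PySem.Str.slice line (some 10) none)]) := by
            simp [parseA_step, h1, h2, h3, pvEmitJoin]
          rw [hA, ih _ "assistant" _ (by simp)]
          simp [pvSegs, pvPre, pvNoMark, hm]
        · have hm := pvMatch_none h1 h2 h3
          have hA : parseA_step (d, some r, c) line = (d, some r, c ++ [line]) := by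
            simp [parseA_step, h1, h2, h3]
          rw [hA, ih _ r (c ++ [line]) (by simp)]
          simp [pvSegs, pvPre, pvNoMark, hm]
    -- (c ++ [line]) ++ pvPre ls = c ++ (line :: pvPre ls) is handled by simp's List.append_assoc

theorem pvA_none (ls : List String) :
    ∀ d, pvFinalA (ls.foldl parseA_step (d, none, [])) =
      ((pvSegs ls).foldl pvEmitJoin d).items := by
  induction ls with
  | nil => intro d; rfl
  | cons line ls ih =>
    intro d
    simp only [List.foldl_cons]
    by_cases h1 : PySem.Chars.startswith line.toList ['S','y','s','t','e','m',':'] = true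
    · have hm := pvMatch_sys h1
      have hA : parseA_step (d, none, []) line =
          (d, some "system", [PySem.Str.strip (PySem.Str.slice line (some 7) none)]) := by
        simp [parseA_step, h1]
      rw [hA, pvA_some ls d "system" _ (by simp)]
      simp [pvSegs, hm]
    · by_cases h2 : PySem.Chars.startswith line.toList ['U','s','e','r',':'] = true
      · have hm := pvMatch_user h1 h2
        have hA : parseA_step (d, none, []) line =
            (d, some "user", [PySem.Str.strip (PySem.Str.slice line (some 5) none)]) := by
          simp [parseA_step, h1, h2]
        rw [hA, pvA_some ls d "user" _ (by simp)]
        simp [pvSegs, hm]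
      · by_cases h3 : PySem.Chars.startswith line.toList ['A','s','s','i','s','t','a','n','t',':'] = true
        · have hm := pvMatch_asst h1 h2 h3
          have hA : parseA_step (d, none, []) line =
              (d, some "assistant", [PySem.Str.strip (PySem.Str.slice line (some 10) none)]) := by
            simp [parseA_step, h1, h2, h3]
          rw [hA, pvA_some ls d "assistant" _ (by simp)]
          simp [pvSegs, hm]
        · have hm := pvMatch_none h1 h2 h3
          have hA : parseA_step (d, none, []) line = (d, none, ([] : List String)) := by
            simp [parseA_step, h1, h2, h3]
          rw [hA, ih d]
          simp [pvSegs, hm]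

-- B's backward fold computes the per-role joined blocks reversed, plus the reversed pre-marker tail
theorem pvB_foldr (ls : List String) :
    ls.foldr (fun line st => parseB_step st line) (pvMkD [] [] [], []) =
      (pvMkD (pvSel "system" (pvSegs ls)).reverse (pvSel "user" (pvSegs ls)).reverse
        (pvSel "assistant" (pvSegs ls)).reverse, (pvPre ls).reverse) := by
  induction ls with
  | nil => simp [pvSel, pvSegs, pvPre]
  | cons line ls ih =>
    simp only [List.foldr_cons, ih]
    cases hm : pvMatchMarker pvMarkers line with
    | none =>
      simp only [parseB_step, hm]
      simp [pvSegs, pvPre, pvNoMark, hm]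
    | some p =>
      obtain ⟨r, h⟩ := p
      have hsegs : pvSegs (line :: ls) = (r, h :: pvPre ls) :: pvSegs ls := by
        simp [pvSegs, hm]
      have hpre : pvPre (line :: ls) = [] := by simp [pvPre, pvNoMark, hm]
      rw [hsegs, hpre]
      rcases pvMatchMarker_roles hm with hr | hr | hr <;> subst hr
      · rw [show pvSel "system" (("system", h :: pvPre ls) :: pvSegs ls)
              = PySem.Str.join "\n" (h :: pvPre ls) :: pvSel "system" (pvSegs ls) from by
            simp [pvSel],
          show pvSel "user" (("system", h :: pvPre ls) :: pvSegs ls)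
              = pvSel "user" (pvSegs ls) from by simp [pvSel],
          show pvSel "assistant" (("system", h :: pvPre ls) :: pvSegs ls)
              = pvSel "assistant" (pvSegs ls) from by simp [pvSel]]
        simp only [parseB_step, hm, PySem.List.slice?_none_none_neg_one, Option.getD_some,
          List.reverse_reverse, List.reverse_cons]
        exact Prod.ext (pvEmit_mkD_sys _ _ _ _) rfl
      · rw [show pvSel "user" (("user", h :: pvPre ls) :: pvSegs ls)
              = PySem.Str.join "\n" (h :: pvPre ls) :: pvSel "user" (pvSegs ls) from by
            simp [pvSel],
          show pvSel "system" (("user", h :: pvPre ls) :: pvSegs ls)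
              = pvSel "system" (pvSegs ls) from by simp [pvSel],
          show pvSel "assistant" (("user", h :: pvPre ls) :: pvSegs ls)
              = pvSel "assistant" (pvSegs ls) from by simp [pvSel]]
        simp only [parseB_step, hm, PySem.List.slice?_none_none_neg_one, Option.getD_some,
          List.reverse_reverse, List.reverse_cons]
        exact Prod.ext (pvEmit_mkD_user _ _ _ _) rfl
      · rw [show pvSel "assistant" (("assistant", h :: pvPre ls) :: pvSegs ls)
              = PySem.Str.join "\n" (h :: pvPre ls) :: pvSel "assistant" (pvSegs ls) from by
            simp [pvSel],
          show pvSel "system" (("assistant", h :: pvPre ls) :: pvSegs ls)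
              = pvSel "system" (pvSegs ls) from by simp [pvSel],
          show pvSel "user" (("assistant", h :: pvPre ls) :: pvSegs ls)
              = pvSel "user" (pvSegs ls) from by simp [pvSel]]
        simp only [parseB_step, hm, PySem.List.slice?_none_none_neg_one, Option.getD_some,
          List.reverse_reverse, List.reverse_cons]
        exact Prod.ext (pvEmit_mkD_asst _ _ _ _) rfl

-- items of the three-key dict, and B's final rebuild (insert-fold over three distinct keys)
theorem pvMkD_items (x y z : List String) :
    (pvMkD x y z).items = [("system", x), ("user", y), ("assistant", z)] := rfl

theorem pvB_rebuild (x y z : List String) :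
    (((pvMkD x y z).items.foldl
      (fun d p => d.insert p.1 ((PySem.List.slice? p.2 none none (-1)).getD []))
      PySem.Dict.empty)).items = [("system", x.reverse), ("user", y.reverse), ("assistant", z.reverse)] := by
  simp [pvMkD_items, PySem.List.slice?_none_none_neg_one, PySem.Dict.insert, PySem.Dict.empty]

-- ===== VERDICT (by name: the statement is the Claim_ definition above) =====
theorem parse_prompt_py_spec : Claim_equal_parse_prompt_py := by
  intro prompt template _
  show parse_prompt_py prompt template = parse_prompt_py_alt prompt template
  have key : ∀ ls : List String,
      pvFinalA (ls.foldl parseA_step (pvMkD [] [] [], none, [])) =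
        ((ls.reverse.foldl parseB_step (pvMkD [] [] [], [])).1.items.foldl
          (fun d p => d.insert p.1 ((PySem.List.slice? p.2 none none (-1)).getD []))
          PySem.Dict.empty).items := by
    intro ls
    rw [pvA_none ls, pvFoldl_emitJoin (pvSegs ls) [] [] [] (pvSegs_roles ls),
      List.foldl_reverse, pvB_foldr ls]
    rw [show ((pvMkD (pvSel "system" (pvSegs ls)).reverse (pvSel "user" (pvSegs ls)).reverse
          (pvSel "assistant" (pvSegs ls)).reverse, (pvPre ls).reverse)).1 =
        pvMkD (pvSel "system" (pvSegs ls)).reverse (pvSel "user" (pvSegs ls)).reverse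
          (pvSel "assistant" (pvSegs ls)).reverse from rfl,
      pvB_rebuild, pvMkD_items]
    simp
  exact key ((PySem.Str.split? prompt "\n").getD [])
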